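-- pv_equiv track=rewrite | github.com/MrBrantCode/unitest_baseline | mut_generate/mist_train_cf/cf_56399/solution.py | simplifiedFractions
-- ===== SOURCE A (Python) =====
-- def simplifiedFractions(n):
--     def gcd(a, b):
--         if b == 0: return a
--         return gcd(b, a % b)
--
--     fractions = []
--     odd_num = 0
--
--     for den in range(2, n + 1):
--         for num in range(1, den):
--             if gcd(num, den) == 1:
--                 fractions.append(f'{num}/{den}')
--                 if num % 2 == 1:
--                     odd_num += 1
--
--     return fractions, odd_num
-- ===== SOURCE B (Python) =====
-- def simplifiedFractions(n):
--     fractions = []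
--     odd_num = 0
--     for den in range(2, n + 1):
--         # keep only numerators sharing no divisor >= 2 with den:
--         # successively strike out multiples of each divisor of den
--         nums = list(range(1, den))
--         for d in range(2, den + 1):
--             if den % d == 0:
--                 nums = [x for x in nums if x % d != 0]
--         for x in nums:
--             fractions.append(f'{x}/{den}')
--             if x % 2 == 1:
--                 odd_num += 1
--     return fractions, odd_num
-- ===== Notes on version B (the rewrite author's own statement) =====
-- stated objective: alternative
-- what changed: Replaces the per-pair recursive-gcd test with, per denominator, a divisor-striking pass: list numerators 1..den-1 and successively filter out multiples of each divisor of den, then emit the survivors.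
import Mathlib
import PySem

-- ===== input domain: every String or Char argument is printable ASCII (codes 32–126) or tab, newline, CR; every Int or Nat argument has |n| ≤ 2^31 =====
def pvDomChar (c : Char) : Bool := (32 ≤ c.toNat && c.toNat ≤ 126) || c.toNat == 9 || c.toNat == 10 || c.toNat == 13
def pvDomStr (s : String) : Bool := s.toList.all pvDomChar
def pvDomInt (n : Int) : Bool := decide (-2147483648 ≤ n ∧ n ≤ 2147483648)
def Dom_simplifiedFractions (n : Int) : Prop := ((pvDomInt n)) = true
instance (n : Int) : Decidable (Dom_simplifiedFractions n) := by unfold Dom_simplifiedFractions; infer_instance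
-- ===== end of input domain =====

-- B replaces the per-pair recursive-gcd coprimality test with a per-denominator
-- divisor-striking pass (filter out multiples of each divisor of den); same results, alternative algorithm.

-- ===== PORT A =====
-- A's inner recursive gcd; Python % with the arguments A produces (b is the decreasing one).
def pyGcdA (a b : Int) : Int :=
  if b = 0 then a else pyGcdA b (PySem.Int.mod a b)
termination_by b.natAbs
decreasing_by
  rcases lt_trichotomy b 0 with hb | hb | hb
  · have h1 := PySem.Int.mod_neg_bounds a hb
    omega
  · omega
  · have h1 := PySem.Int.mod_nonneg a hb
    have h2 := PySem.Int.mod_lt a hb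
    omega

def simplifiedFractions (n : Int) : List String × Int :=
  (PySem.List.pyRange 2 (n + 1) 1).foldl
    (fun st den =>
      (PySem.List.pyRange 1 den 1).foldl
        (fun st2 num =>
          if pyGcdA num den = 1 then
            (st2.1 ++ [PySem.Int.toStr num ++ "/" ++ PySem.Int.toStr den],
             if PySem.Int.mod num 2 = 1 then st2.2 + 1 else st2.2)
          else st2)
        st)
    ([], 0)

-- ===== PORT B =====
def simplifiedFractions_alt (n : Int) : List String × Int :=
  (PySem.List.pyRange 2 (n + 1) 1).foldl
    (fun st den =>
      -- strike out, from 1..den-1, the multiples of each divisor d of den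
      let nums := (PySem.List.pyRange 2 (den + 1) 1).foldl
        (fun l d =>
          if PySem.Int.mod den d = 0 then l.filter (fun x => decide (PySem.Int.mod x d ≠ 0)) else l)
        (PySem.List.pyRange 1 den 1)
      nums.foldl
        (fun st2 x =>
          (st2.1 ++ [PySem.Int.toStr x ++ "/" ++ PySem.Int.toStr den],
           if PySem.Int.mod x 2 = 1 then st2.2 + 1 else st2.2))
        st)
    ([], 0)

-- ===== PRECONDITION & SPEC =====
def Spec_simplifiedFractions (n : Int) (out : List String × Int) : Prop := out = simplifiedFractions_alt n
instance (n : Int) (out : List String × Int) : Decidable (Spec_simplifiedFractions n out) := by unfold Spec_simplifiedFractions; infer_instance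

-- ===== CLAIM (what is proved, stated in full; the proofs are below) =====
def Claim_equal_simplifiedFractions : Prop := ∀ (n : Int), Dom_simplifiedFractions n → Spec_simplifiedFractions n (simplifiedFractions n)

-- ===== LEMMAS AND PROOFS =====

-- a conditional-append fold is the unconditional fold over the filtered list
theorem foldl_ite_filter {β : Type} (p : Int → Prop) [DecidablePred p] (g : β → Int → β) :
    ∀ (l : List Int) (init : β),
      l.foldl (fun acc x => if p x then g acc x else acc) init
        = (l.filter (fun x => decide (p x))).foldl g init := by
  intro l
  induction l with
  | nil => intro init; rfl
  | cons y l ih =>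
      intro init
      by_cases hy : p y <;> simp [hy, ih]

-- a chain of conditional filters is one filter by the conjunction
theorem foldl_filter_chain (q : Int → Prop) [DecidablePred q] (p : Int → Int → Bool) :
    ∀ (ds : List Int) (l0 : List Int),
      ds.foldl (fun l d => if q d then l.filter (p d) else l) l0
        = l0.filter (fun x => ds.all (fun d => !decide (q d) || p d x)) := by
  intro ds
  induction ds with
  | nil => intro l0; simp
  | cons d ds ih =>
      intro l0
      by_cases hd : q d
      · simp only [List.foldl_cons, if_pos hd, ih, List.filter_filter]
        refine List.filter_congr ?_
        intro x _
        simp [hd, Bool.and_comm]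
      · simp only [List.foldl_cons, if_neg hd, ih]
        refine List.filter_congr ?_
        intro x _
        simp [hd]

-- A's recursive Euclid equals Int.gcd on nonnegative arguments
theorem pyGcdA_eq_gcd : ∀ (a b : Int), 0 ≤ a → 0 ≤ b → pyGcdA a b = (Int.gcd a b : Int) := by
  intro a b ha hb
  rw [pyGcdA]
  split
  · rename_i h0
    subst h0
    rw [Int.gcd_zero_right, Int.natAbs_of_nonneg ha]
  · rename_i h0
    have hbpos : 0 < b := lt_of_le_of_ne hb (Ne.symm h0)
    have hm := PySem.Int.mod_eq_emod_of_pos (a := a) hbpos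
    have hmn : 0 ≤ PySem.Int.mod a b := PySem.Int.mod_nonneg a hbpos
    have hml : PySem.Int.mod a b < b := PySem.Int.mod_lt a hbpos
    have ih := pyGcdA_eq_gcd b (PySem.Int.mod a b) hb hmn
    rw [ih]
    congr 1
    have habs : (PySem.Int.mod a b).natAbs = a.natAbs % b.natAbs := by
      rw [hm]
      calc (a % b).natAbs = ((a.natAbs : Int) % (b.natAbs : Int)).natAbs := by
            rw [Int.natAbs_of_nonneg ha, Int.natAbs_of_nonneg (le_of_lt hbpos)]
        _ = ((a.natAbs % b.natAbs : Nat) : Int).natAbs := by rw [Int.natCast_mod]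
        _ = a.natAbs % b.natAbs := Int.natAbs_natCast _
    show Nat.gcd b.natAbs (PySem.Int.mod a b).natAbs = Nat.gcd a.natAbs b.natAbs
    rw [habs, Nat.gcd_comm b.natAbs, ← Nat.gcd_rec, Nat.gcd_comm]
termination_by _ b _ _ => b.natAbs
decreasing_by
  rcases lt_trichotomy b 0 with hb' | hb' | hb'
  · have h1 := PySem.Int.mod_neg_bounds a hb'
    omega
  · omega
  · have h1 := PySem.Int.mod_nonneg a hb'
    have h2 := PySem.Int.mod_lt a hb'
    omega

theorem gcd_eq_one_iff_no_common_divisor (num den : Int) (h1 : 1 ≤ num) (h2 : num < den) :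
    (Int.gcd num den = 1)
      ↔ ∀ d : Int, 2 ≤ d → d < den + 1 → d ∣ den → ¬ d ∣ num := by
  constructor
  · intro hg d hd2 _ hden hnum
    have h1' : d.natAbs ∣ num.natAbs := Int.natAbs_dvd_natAbs.mpr hnum
    have h3' : d.natAbs ∣ den.natAbs := Int.natAbs_dvd_natAbs.mpr hden
    have h4' : d.natAbs ∣ Int.gcd num den := Nat.dvd_gcd h1' h3'
    have hd : d ∣ ((Int.gcd num den : Nat) : Int) := by
      have h5' : (d.natAbs : Int) ∣ ((Int.gcd num den : Nat) : Int) := Int.natCast_dvd_natCast.mpr h4'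
      rwa [Int.natAbs_of_nonneg (by omega : (0:Int) ≤ d)] at h5'
    rw [hg] at hd
    have := Int.le_of_dvd one_pos hd
    omega
  · intro h
    by_contra hne
    have hnum : ((Int.gcd num den : Nat) : Int) ∣ num := Int.gcd_dvd_left num den
    have hden : ((Int.gcd num den : Nat) : Int) ∣ den := Int.gcd_dvd_right num den
    have hg0 : Int.gcd num den ≠ 0 := by
      intro h0
      rw [Int.gcd_eq_zero_iff] at h0
      omega
    have h21 : Int.gcd num den ≠ 1 := hne
    have hg2n : 2 ≤ Int.gcd num den := by omega
    have hg2 : (2 : Int) ≤ ((Int.gcd num den : Nat) : Int) := by exact_mod_cast hg2n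
    have hgle : ((Int.gcd num den : Nat) : Int) ≤ den := Int.le_of_dvd (by omega) hden
    exact h _ hg2 (by omega) hden hnum

-- the pointwise agreement of the two coprimality tests on 1 ≤ num < den
theorem test_agree (den num : Int) (h1 : 1 ≤ num) (h2 : num < den) :
    decide (pyGcdA num den = 1)
      = (PySem.List.pyRange 2 (den + 1) 1).all
          (fun d => !decide (PySem.Int.mod den d = 0) || decide (PySem.Int.mod num d ≠ 0)) := by
  have hgcd : pyGcdA num den = (Int.gcd num den : Int) :=
    pyGcdA_eq_gcd num den (by omega) (by omega)
  rw [Bool.eq_iff_iff]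
  simp only [hgcd, decide_eq_true_eq, List.all_eq_true, Bool.or_eq_true, Bool.not_eq_eq_eq_not,
    Bool.not_true, decide_eq_false_iff_not, PySem.List.mem_pyRange_one, ne_eq,
    PySem.Int.mod_eq_zero_iff_dvd]
  have hcast : ((Int.gcd num den : Nat) : Int) = 1 ↔ Int.gcd num den = 1 := by
    constructor <;> intro h <;> exact_mod_cast h
  rw [hcast, gcd_eq_one_iff_no_common_divisor num den h1 h2]
  constructor
  · intro h d hd
    rcases em (d ∣ den) with hdv | hdv
    · exact Or.inr (h d hd.1 hd.2 hdv)
    · exact Or.inl hdv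
  · intro h d hd2 hdlt hdden
    rcases h d ⟨hd2, hdlt⟩ with h' | h'
    · exact absurd hdden h'
    · exact h'

theorem step_eq (den : Int) (st : List String × Int) :
    (PySem.List.pyRange 1 den 1).foldl
        (fun st2 num =>
          if pyGcdA num den = 1 then
            (st2.1 ++ [PySem.Int.toStr num ++ "/" ++ PySem.Int.toStr den],
             if PySem.Int.mod num 2 = 1 then st2.2 + 1 else st2.2)
          else st2)
        st
      = ((PySem.List.pyRange 2 (den + 1) 1).foldl
          (fun l d =>
            if PySem.Int.mod den d = 0 then l.filter (fun x => decide (PySem.Int.mod x d ≠ 0)) else l)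
          (PySem.List.pyRange 1 den 1)).foldl
        (fun st2 x =>
          (st2.1 ++ [PySem.Int.toStr x ++ "/" ++ PySem.Int.toStr den],
           if PySem.Int.mod x 2 = 1 then st2.2 + 1 else st2.2))
        st := by
  rw [foldl_ite_filter (fun num => pyGcdA num den = 1), foldl_filter_chain]
  congr 1
  refine List.filter_congr ?_
  intro num hnum
  rw [PySem.List.mem_pyRange_one] at hnum
  exact test_agree den num hnum.1 hnum.2

-- ===== VERDICT (by name: the statement is the Claim_ definition above) =====
theorem simplifiedFractions_spec : Claim_equal_simplifiedFractions := by
  intro n _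
  show simplifiedFractions n = simplifiedFractions_alt n
  unfold simplifiedFractions simplifiedFractions_alt
  congr 1
  funext st den
  exact step_eq den st
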